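-- pv_equiv track=rewrite | github.com/quiwe/school-admin-ai-assistant | backend/app/services/app_info.py | latest_changelog_section
-- ===== SOURCE A (Python) =====
-- def latest_changelog_section(changelog: str) -> str:
--     lines = changelog.splitlines()
--     sections: list[list[str]] = []
--     current: list[str] = []
--     for line in lines:
--         if line.startswith("## "):
--             if current:
--                 sections.append(current)
--             current = [line]
--         elif current:
--             current.append(line)
--     if current:
--         sections.append(current)
--     return "\n".join(sections[0]).strip() if sections else changelog.strip()
-- ===== SOURCE B (Python) =====
-- def latest_changelog_section(changelog: str) -> str:
--     lines = changelog.splitlines()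
--     start = next((i for i, line in enumerate(lines) if line.startswith("## ")), None)
--     if start is None:
--         return changelog.strip()
--     end = next((j for j in range(start + 1, len(lines)) if lines[j].startswith("## ")),
--                len(lines))
--     return "\n".join(lines[start:end]).strip()
-- ===== Notes on version B (the rewrite author's own statement) =====
-- stated objective: simpler
-- what changed: B locates the first '## ' header and the next one and slices that single section out, instead of accumulating every section into a list-of-lists and taking index 0.
import Mathlib
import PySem

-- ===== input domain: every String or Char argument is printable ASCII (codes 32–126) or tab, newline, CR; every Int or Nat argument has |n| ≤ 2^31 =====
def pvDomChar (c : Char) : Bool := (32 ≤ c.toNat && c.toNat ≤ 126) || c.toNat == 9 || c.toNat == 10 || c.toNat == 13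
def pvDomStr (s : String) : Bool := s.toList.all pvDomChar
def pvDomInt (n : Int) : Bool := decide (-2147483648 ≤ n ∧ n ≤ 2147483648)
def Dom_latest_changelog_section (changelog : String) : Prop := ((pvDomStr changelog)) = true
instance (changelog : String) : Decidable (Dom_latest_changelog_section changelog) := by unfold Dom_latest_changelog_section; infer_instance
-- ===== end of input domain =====

-- B locates the first '## ' header line and the next one and slices that single
-- section out, instead of accumulating every section into a list-of-lists and
-- taking index 0 (objective: simpler).

-- ===== PORT A =====
-- one iteration of A's loop over the state (sections, current)
def stepA (st : List (List String) × List String) (line : String) :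
    List (List String) × List String :=
  if PySem.Str.startswith line "## " then
    ((if st.2 = [] then st.1 else st.1 ++ [st.2]), [line])
  else if st.2 = [] then st
  else (st.1, st.2 ++ [line])

def latest_changelog_section (changelog : String) : String :=
  let lines := PySem.Str.splitlines changelog
  let st := lines.foldl stepA ([], [])
  let sections := if st.2 = [] then st.1 else st.1 ++ [st.2]
  match sections with
  | [] => PySem.Str.strip changelog
  | s :: _ => PySem.Str.strip (PySem.Str.join "\n" s)

-- ===== PORT B =====
def latest_changelog_section_alt (changelog : String) : String :=
  let lines := PySem.Str.splitlines changelog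
  match lines.findIdx? (fun line => PySem.Str.startswith line "## ") with
  | none => PySem.Str.strip changelog
  | some start =>
    let stop :=
      match (lines.drop (start + 1)).findIdx? (fun line => PySem.Str.startswith line "## ") with
      | some j => start + 1 + j
      | none => lines.length
    PySem.Str.strip (PySem.Str.join "\n" ((lines.drop start).take (stop - start)))

-- ===== PRECONDITION & SPEC =====
def Spec_latest_changelog_section (changelog : String) (out : String) : Prop := out = latest_changelog_section_alt changelog
instance (changelog : String) (out : String) : Decidable (Spec_latest_changelog_section changelog out) := by unfold Spec_latest_changelog_section; infer_instance

-- ===== CLAIM (what is proved, stated in full; the proofs are below) =====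
def Claim_equal_latest_changelog_section : Prop := ∀ (changelog : String), Dom_latest_changelog_section changelog → Spec_latest_changelog_section changelog (latest_changelog_section changelog)

-- ===== LEMMAS AND PROOFS =====

-- lines before the first header leave the initial state untouched
theorem foldl_stepA_skip (pre rest : List String)
    (h : ∀ l ∈ pre, PySem.Str.startswith l "## " = false) :
    (pre ++ rest).foldl stepA ([], []) = rest.foldl stepA ([], []) := by
  induction pre with
  | nil => rfl
  | cons a pre ih =>
    simp only [List.cons_append, List.foldl_cons]
    have ha : PySem.Str.startswith a "## " = false := h a (by simp)
    simp only [stepA, ha, Bool.false_eq_true, if_false]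
    exact ih (fun l hl => h l (by simp [hl]))

-- with a nonempty current section and no headers, the loop just appends to current
theorem foldl_stepA_collect (body : List String) (secs : List (List String)) (cur : List String)
    (hc : cur ≠ []) (h : ∀ l ∈ body, PySem.Str.startswith l "## " = false) :
    body.foldl stepA (secs, cur) = (secs, cur ++ body) := by
  induction body generalizing cur with
  | nil => simp
  | cons a body ih =>
    have ha : PySem.Str.startswith a "## " = false := h a (by simp)
    simp only [List.foldl_cons, stepA, ha, Bool.false_eq_true, if_false, if_neg hc]
    rw [ih (cur ++ [a]) (by simp) (fun l hl => h l (by simp [hl]))]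
    simp

-- the loop only ever appends to the sections list
theorem foldl_stepA_grow (rest : List String) (secs : List (List String)) (cur : List String) :
    ∃ t c, rest.foldl stepA (secs, cur) = (secs ++ t, c) := by
  induction rest generalizing secs cur with
  | nil => exact ⟨[], cur, by simp⟩
  | cons a rest ih =>
    simp only [List.foldl_cons, stepA]
    by_cases hp : PySem.Str.startswith a "## " = true
    · simp only [hp, if_true]
      by_cases hc : cur = []
      · simp only [hc]
        obtain ⟨t, c, h⟩ := ih secs [a]
        exact ⟨t, c, h⟩
      · simp only [if_neg hc]
        obtain ⟨t, c, h⟩ := ih (secs ++ [cur]) [a]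
        exact ⟨[cur] ++ t, c, by rw [h]; simp⟩
    · simp only [hp]
      by_cases hc : cur = []
      · simp only [if_pos hc]
        exact ih secs cur
      · simp only [if_neg hc]
        exact ih secs (cur ++ [a])

-- membership in a take-prefix comes from an index below the cut
theorem mem_take_pred_false (lines : List String) (i : Nat)
    (hmin : ∀ (j : Nat) (hj : j < lines.length), j < i →
      ¬ PySem.Str.startswith lines[j] "## " = true) :
    ∀ l ∈ lines.take i, PySem.Str.startswith l "## " = false := by
  intro l hl
  obtain ⟨j, hj, heq⟩ := List.mem_iff_getElem.mp hl
  rw [List.length_take] at hj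
  rw [List.getElem_take] at heq
  subst heq
  exact Bool.not_eq_true _ ▸ hmin j (by omega) (by omega)


-- the heart of the equivalence, stated over the split line list and the fallback string
theorem core_eq (fallback : String) (lines : List String) :
    (match (if (lines.foldl stepA ([], [])).2 = [] then (lines.foldl stepA ([], [])).1
            else (lines.foldl stepA ([], [])).1 ++ [(lines.foldl stepA ([], [])).2]) with
     | [] => PySem.Str.strip fallback
     | s :: _ => PySem.Str.strip (PySem.Str.join "\n" s)) =
    (match lines.findIdx? (fun line => PySem.Str.startswith line "## ") with
     | none => PySem.Str.strip fallback
     | some start =>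
       PySem.Str.strip (PySem.Str.join "\n" ((lines.drop start).take
         ((match (lines.drop (start + 1)).findIdx? (fun line => PySem.Str.startswith line "## ") with
           | some j => start + 1 + j
           | none => lines.length) - start)))) := by
  cases hfi : lines.findIdx? (fun line => PySem.Str.startswith line "## ") with
  | none =>
    have hall : ∀ l ∈ lines, PySem.Str.startswith l "## " = false := by
      have := List.findIdx?_eq_none_iff.mp hfi
      simpa using this
    have hA : lines.foldl stepA ([], []) = ([], []) := by
      have := foldl_stepA_skip lines [] hall
      simpa using this
    rw [hA]
    simp
  | some i =>
    obtain ⟨hi, hpi, hmin⟩ := List.findIdx?_eq_some_iff_getElem.mp hfi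
    have hdec : lines = lines.take i ++ lines[i] :: lines.drop (i + 1) := by
      rw [List.getElem_cons_drop, List.take_append_drop]
    have hpre := mem_take_pred_false lines i (fun j hj hji => hmin j hji)
    have hstep1 : stepA ([], []) lines[i] = ([], [lines[i]]) := by
      simp only [stepA, hpi, if_true]
    cases hfi2 : (lines.drop (i + 1)).findIdx? (fun line => PySem.Str.startswith line "## ") with
    | none =>
      have hall2 : ∀ l ∈ lines.drop (i + 1), PySem.Str.startswith l "## " = false := by
        have := List.findIdx?_eq_none_iff.mp hfi2
        simpa using this
      have hA : lines.foldl stepA ([], []) = ([], lines[i] :: lines.drop (i + 1)) := by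
        conv_lhs => rw [hdec]
        rw [foldl_stepA_skip _ _ hpre, List.foldl_cons, hstep1,
          foldl_stepA_collect _ [] [lines[i]] (by simp) hall2, List.singleton_append]
      have htake : (lines.drop i).take (lines.length - i) = lines.drop i := by
        apply List.take_of_length_le; simp
      have hdropi : lines.drop i = lines[i] :: lines.drop (i + 1) :=
        (List.getElem_cons_drop hi).symm
      rw [hA, ← hdropi]
      simp only [hfi2]
      rw [htake]
      have hne : List.drop i lines ≠ [] := by rw [hdropi]; exact List.cons_ne_nil _ _
      simp [hne]
    | some j =>
      obtain ⟨hj, hpj, hmin2⟩ := List.findIdx?_eq_some_iff_getElem.mp hfi2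
      have hpre2 := mem_take_pred_false (lines.drop (i + 1)) j (fun k hk hkj => hmin2 k hkj)
      have hdec2 : lines.drop (i + 1) =
          (lines.drop (i + 1)).take j ++ (lines.drop (i + 1))[j] :: (lines.drop (i + 1)).drop (j + 1) := by
        rw [List.getElem_cons_drop, List.take_append_drop]
      have hstep2 : stepA ([], lines[i] :: (lines.drop (i + 1)).take j) (lines.drop (i + 1))[j] =
          ([lines[i] :: (lines.drop (i + 1)).take j], [(lines.drop (i + 1))[j]]) := by
        simp only [stepA, hpj, if_true]; rfl
      obtain ⟨t, c, hg⟩ := foldl_stepA_grow ((lines.drop (i + 1)).drop (j + 1))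
        [lines[i] :: (lines.drop (i + 1)).take j] [(lines.drop (i + 1))[j]]
      have hA : lines.foldl stepA ([], []) =
          ([lines[i] :: (lines.drop (i + 1)).take j] ++ t, c) := by
        conv_lhs => rw [hdec]
        rw [foldl_stepA_skip _ _ hpre, List.foldl_cons, hstep1]
        conv_lhs => rw [hdec2]
        rw [List.foldl_append, foldl_stepA_collect _ [] [lines[i]] (by simp) hpre2,
          List.singleton_append, List.foldl_cons, hstep2, hg]
      have hdropi : lines.drop i = lines[i] :: lines.drop (i + 1) :=
        (List.getElem_cons_drop hi).symm
      have hslice : (lines.drop i).take (i + 1 + j - i) = lines[i] :: (lines.drop (i + 1)).take j := by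
        rw [hdropi]
        have h1 : i + 1 + j - i = j + 1 := by omega
        rw [h1, List.take_succ_cons]
      rw [hA]
      simp only [hfi2]
      rw [hslice]
      by_cases hc : c = [] <;> simp [hc]

theorem latest_eq (changelog : String) :
    latest_changelog_section changelog = latest_changelog_section_alt changelog := by
  unfold latest_changelog_section latest_changelog_section_alt
  exact core_eq changelog (PySem.Str.splitlines changelog)

-- ===== VERDICT (by name: the statement is the Claim_ definition above) =====
theorem latest_changelog_section_spec : Claim_equal_latest_changelog_section := by
  intro changelog _
  unfold Spec_latest_changelog_section
  exact latest_eq changelog
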